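-- pv_equiv track=rewrite | github.com/GuillermoReyesMtz/Humming-coding | Humming/hummingcode.py | verificador
-- ===== SOURCE A (Python) =====
-- def verificador(code,H):
--     suma_aux=0
--     suma=""
--     resul=""
--     res_mult=[]
--     for row in H:
--         for i in range(0,len(code)):
--             val1=int(code[i])
--             val2=int(row[i])
--             suma_aux=val1*val2
--             if suma_aux%2 == 0:
--                 resul='0'
--             else:
--                 resul='1'
--             suma+=resul
--         res_mult.append(suma)
--         suma=""
--
--     aux=0
--     vector_resultante=[]
--     for i in res_mult:
--         for j in i:
--             aux=aux+int(j)
--         if aux%2 ==0: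
--             vector_resultante.append(0)
--         else:
--             vector_resultante.append(1)
--         aux=0
--     valido=1
--     if max(vector_resultante)==1:
--         valido=0
--
--     return valido,vector_resultante
-- ===== SOURCE B (Python) =====
-- def verificador(code, H):
--     vector_resultante = [sum(int(code[i]) * int(row[i]) for i in range(len(code))) % 2
--                          for row in H]
--     valido = 0 if max(vector_resultante) == 1 else 1
--     return valido, vector_resultante
-- ===== Notes on version B (the rewrite author's own statement) =====
-- stated objective: simpler
-- what changed: B computes each syndrome entry in one pass as sum(code[i]*row[i]) % 2, eliminating A's intermediate '0'/'1' bit-string matrix and the second digit-summing loop over it.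
import Mathlib
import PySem

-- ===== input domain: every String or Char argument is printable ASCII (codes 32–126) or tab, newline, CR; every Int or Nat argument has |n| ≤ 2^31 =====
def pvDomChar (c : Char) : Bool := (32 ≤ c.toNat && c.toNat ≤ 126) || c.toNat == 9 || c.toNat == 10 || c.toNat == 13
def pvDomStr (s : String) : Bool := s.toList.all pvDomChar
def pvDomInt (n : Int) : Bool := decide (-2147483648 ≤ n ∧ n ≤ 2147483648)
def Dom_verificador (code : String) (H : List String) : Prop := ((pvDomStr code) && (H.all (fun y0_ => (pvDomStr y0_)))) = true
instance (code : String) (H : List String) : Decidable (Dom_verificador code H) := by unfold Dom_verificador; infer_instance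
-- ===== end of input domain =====

-- B replaces A's two-phase computation (a '0'/'1' bit-string matrix, then a digit-summing pass
-- over it) by a direct one-pass syndrome: each entry is sum(code[i]*row[i]) % 2 — simpler.

-- int(c) for a single digit character c (exact on '0'..'9', the only case Pre_ admits;
-- on any other character Python's int() raises and the input is outside Pre_).
def pyIntChar (c : Char) : Int := (c.toNat : Int) - ('0'.toNat : Int)

-- ===== PORT A =====
-- inner loop of A's first phase: builds the row's '0'/'1' string `suma`
-- (indexing row[i] is exact inside Pre_, where i < len(row); Python raises otherwise)
def rowBitsA (cs rs : List Char) : List Char :=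
  (List.range cs.length).foldl (fun suma i =>
    let val1 := pyIntChar (cs.getD i ' ')
    let val2 := pyIntChar (rs.getD i ' ')
    let suma_aux := val1 * val2
    let resul := if PySem.Int.mod suma_aux 2 = 0 then '0' else '1'
    suma ++ [resul]) []

def verificador (code : String) (H : List String) : Int × List Int :=
  let cs := code.toList
  let res_mult : List (List Char) := H.foldl (fun acc row => acc ++ [rowBitsA cs row.toList]) []
  let vector_resultante : List Int := res_mult.foldl (fun v i =>
    let aux := i.foldl (fun a j => a + pyIntChar j) 0
    v ++ [if PySem.Int.mod aux 2 = 0 then (0 : Int) else 1]) []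
  -- max(vector_resultante): raises on [], excluded by Pre_ (H ≠ [])
  let valido : Int := if PySem.List.max? vector_resultante (fun y => y) = some 1 then 0 else 1
  (valido, vector_resultante)

-- ===== PORT B =====
-- one syndrome entry: sum(int(code[i]) * int(row[i]) for i in range(len(code))) % 2
def rowSynB (cs rs : List Char) : Int :=
  PySem.Int.mod
    ((List.range cs.length).foldl
      (fun a i => a + pyIntChar (cs.getD i ' ') * pyIntChar (rs.getD i ' ')) 0) 2

def verificador_alt (code : String) (H : List String) : Int × List Int :=
  let cs := code.toList
  let vector_resultante : List Int := H.map (fun row => rowSynB cs row.toList)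
  let valido : Int := if PySem.List.max? vector_resultante (fun y => y) = some 1 then 0 else 1
  (valido, vector_resultante)

-- ===== PRECONDITION & SPEC =====
-- Pre_ excludes exactly the inputs where the Python raises: empty H (max([]) ValueError),
-- a non-digit character of code or of the first len(code) chars of a row (int() ValueError),
-- and a row shorter than code (IndexError).
def Pre_verificador (code : String) (H : List String) : Prop :=
  H ≠ [] ∧ code.toList.all Char.isDigit = true ∧
  ∀ r ∈ H, code.toList.length ≤ r.toList.length ∧
    (r.toList.take code.toList.length).all Char.isDigit = true
instance (code : String) (H : List String) : Decidable (Pre_verificador code H) := by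
  unfold Pre_verificador; infer_instance

def pvWitness_verificador : String × List String := ("0110", ["1010", "0110", "1111"])

def Spec_verificador (code : String) (H : List String) (out : Int × List Int) : Prop := out = verificador_alt code H
instance (code : String) (H : List String) (out : Int × List Int) : Decidable (Spec_verificador code H out) := by unfold Spec_verificador; infer_instance

-- ===== CLAIM (what is proved, stated in full; the proofs are below) =====
def Claim_equal_verificador : Prop := ∀ (code : String) (H : List String), Dom_verificador code H → Pre_verificador code H → Spec_verificador code H (verificador code H)

-- ===== LEMMAS AND PROOFS =====

-- A's bit string for a row is the map of the per-index parity bit.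
theorem rowBitsA_eq_map (cs rs : List Char) :
    rowBitsA cs rs = (List.range cs.length).map
      (fun i => if PySem.Int.mod (pyIntChar (cs.getD i ' ') * pyIntChar (rs.getD i ' ')) 2 = 0
                then '0' else '1') := by
  rw [rowBitsA, PySem.List.foldl_append_singleton_eq_map, List.nil_append]

theorem mod_parity_fold (l : List Int) : ∀ (a b : Int), PySem.Int.mod a 2 = PySem.Int.mod b 2 →
    PySem.Int.mod (l.foldl (fun a x => a + PySem.Int.mod x 2) a) 2
      = PySem.Int.mod (l.foldl (fun a x => a + x) b) 2 := by
  induction l with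
  | nil => intro a b h; exact h
  | cons x t ih =>
      intro a b h
      apply ih
      simp only [PySem.Int.mod_eq_emod_of_pos (by norm_num : (0:Int) < 2)] at *
      omega

-- parity of A's digit sum over a row's bit string = B's syndrome entry
theorem rowParity_eq (cs rs : List Char) :
    (if PySem.Int.mod ((rowBitsA cs rs).foldl (fun a j => a + pyIntChar j) 0) 2 = 0
     then (0 : Int) else 1) = rowSynB cs rs := by
  rw [rowBitsA_eq_map]
  unfold rowSynB
  rw [List.foldl_map]
  have h : ((List.range cs.length).foldl
      (fun (a : Int) (i : Nat) => a + pyIntChar (if PySem.Int.mod (pyIntChar (cs.getD i ' ') * pyIntChar (rs.getD i ' ')) 2 = 0 then '0' else '1')) 0)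
      = ((List.range cs.length).foldl
      (fun (a : Int) (i : Nat) => a + PySem.Int.mod (pyIntChar (cs.getD i ' ') * pyIntChar (rs.getD i ' ')) 2) 0) := by
    apply PySem.List.foldl_congr_mem
    intro a i _
    simp only [PySem.Int.mod_eq_emod_of_pos (show (0:Int) < 2 by norm_num)]
    by_cases hc : pyIntChar (cs.getD i ' ') * pyIntChar (rs.getD i ' ') % 2 = 0
    · rw [if_pos hc, hc, show pyIntChar '0' = 0 from by decide]
    · have h1 : pyIntChar (cs.getD i ' ') * pyIntChar (rs.getD i ' ') % 2 = 1 := by omega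
      rw [if_neg hc, h1, show pyIntChar '1' = 1 from by decide]
  rw [h]
  have h2 := mod_parity_fold
    ((List.range cs.length).map (fun i => pyIntChar (cs.getD i ' ') * pyIntChar (rs.getD i ' ')))
    0 0 rfl
  rw [List.foldl_map, List.foldl_map] at h2
  rw [h2]
  have hnn : 0 ≤ PySem.Int.mod ((List.range cs.length).foldl (fun (a : Int) i => a + pyIntChar (cs.getD i ' ') * pyIntChar (rs.getD i ' ')) 0) 2 :=
    PySem.Int.mod_nonneg _ (by norm_num)
  have hlt : PySem.Int.mod ((List.range cs.length).foldl (fun (a : Int) i => a + pyIntChar (cs.getD i ' ') * pyIntChar (rs.getD i ' ')) 0) 2 < 2 :=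
    PySem.Int.mod_lt _ (by norm_num)
  split_ifs with hz
  · omega
  · omega

-- ===== VERDICT (by name: the statement is the Claim_ definition above) =====
theorem verificador_spec : Claim_equal_verificador := by
  intro code H _ _
  unfold Spec_verificador verificador verificador_alt
  dsimp only
  rw [PySem.List.foldl_append_singleton_eq_map, List.nil_append,
      PySem.List.foldl_append_singleton_eq_map, List.nil_append, List.map_map]
  have hv : (H.map (fun row =>
        if PySem.Int.mod ((rowBitsA code.toList row.toList).foldl (fun a j => a + pyIntChar j) 0) 2 = 0
        then (0 : Int) else 1))
      = H.map (fun row => rowSynB code.toList row.toList) := by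
    apply List.map_congr_left
    intro row _
    exact rowParity_eq code.toList row.toList
  simp only [Function.comp_def]
  simp only [hv]
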